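-- pv_equiv track=rewrite | github.com/Amirhosseinpoor/streamingapp | server/realTime/test.py | backAndForth
-- ===== SOURCE A (Python) =====
-- FPS = 25
--
-- def backAndForth(tips:list):
--     preX = None
--     preY = None
--     vxs = []
--     vys = []
--     for tip in tips:
--         x = tip[0]
--         y = tip[1]
--         if(preX == None):
--             vx = 0
--             vy = 0
--             pass
--         else:
--
--             vx = (x - preX) * FPS
--             vy = (y - preY) * FPS
--         vxs.append(vx)
--         vys.append(vy)
--         preX = x
--         preY = y
--     preVx = None
--     preVy = None
--     result = 0
--     for vx,vy in zip(vxs,vys):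
--         if(preVx != None):
--             if(vx * preVx <0 or vy*preVy<0):
--                 result+=1
--         preVx = vx
--         preVy = vy
--         pass
--
--     return result
-- ===== SOURCE B (Python) =====
-- def backAndForth(tips: list):
--     # Count sign reversals directly on consecutive position differences over a
--     # sliding 3-point window; no velocity lists, no FPS scaling (scaling by a
--     # positive constant cannot change the sign of a product).
--     result = 0
--     for p0, p1, p2 in zip(tips, tips[1:], tips[2:]):
--         if (p2[0] - p1[0]) * (p1[0] - p0[0]) < 0 or (p2[1] - p1[1]) * (p1[1] - p0[1]) < 0:
--             result += 1
--     return result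
-- ===== Notes on version B (the rewrite author's own statement) =====
-- stated objective: simpler
-- what changed: B drops the two velocity lists and the FPS scaling entirely and counts sign changes of consecutive position differences in one sliding 3-point window over zip(tips, tips[1:], tips[2:]).
import Mathlib
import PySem

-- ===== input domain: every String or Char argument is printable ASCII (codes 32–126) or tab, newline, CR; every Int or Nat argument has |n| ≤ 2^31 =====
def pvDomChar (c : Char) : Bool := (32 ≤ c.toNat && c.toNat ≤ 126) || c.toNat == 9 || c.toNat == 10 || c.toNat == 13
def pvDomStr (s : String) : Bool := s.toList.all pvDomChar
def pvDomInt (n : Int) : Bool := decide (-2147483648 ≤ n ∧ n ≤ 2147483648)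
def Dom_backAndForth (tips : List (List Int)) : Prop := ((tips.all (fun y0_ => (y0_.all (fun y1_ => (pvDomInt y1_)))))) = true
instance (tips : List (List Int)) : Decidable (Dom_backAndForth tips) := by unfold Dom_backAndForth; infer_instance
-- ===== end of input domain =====

-- B replaces A's two passes (build velocity lists, then scan them) by a single sliding
-- 3-point window over the positions, dropping the velocity lists and the FPS scaling; objective: simpler.

-- ===== PORT A =====
def FPS : Int := 25

-- first loop of A: accumulate velocity lists (tip[0]/tip[1] are total here via getD;
-- Pre_ excludes the inputs where Python raises IndexError)
def stepVel (st : Option Int × Option Int × List Int × List Int) (tip : List Int) :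
    Option Int × Option Int × List Int × List Int :=
  let x := PySem.List.pyGetD tip 0 0
  let y := PySem.List.pyGetD tip 1 0
  match st with
  | (preX, preY, vxs, vys) =>
    match preX, preY with
    | some px, some py => (some x, some y, vxs ++ [(x - px) * FPS], vys ++ [(y - py) * FPS])
    | _, _ => (some x, some y, vxs ++ [0], vys ++ [0])

-- second loop of A: count sign reversals of consecutive velocities
-- (A guards on preVx != None; preVy is then always set too, so matching both is exact)
def stepRev (st : Option Int × Option Int × Int) (vv : Int × Int) : Option Int × Option Int × Int :=
  match st with
  | (preVx, preVy, result) =>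
    let result := match preVx, preVy with
      | some pvx, some pvy => if vv.1 * pvx < 0 ∨ vv.2 * pvy < 0 then result + 1 else result
      | _, _ => result
    (some vv.1, some vv.2, result)

def backAndForth (tips : List (List Int)) : Int :=
  let s := tips.foldl stepVel (none, none, [], [])
  let vpairs := s.2.2.1.zip s.2.2.2
  (vpairs.foldl stepRev (none, none, 0)).2.2

-- ===== PORT B =====
def stepB (result : Int) (t : List Int × List Int × List Int) : Int :=
  match t with
  | (p0, p1, p2) =>
    if (PySem.List.pyGetD p2 0 0 - PySem.List.pyGetD p1 0 0) *
         (PySem.List.pyGetD p1 0 0 - PySem.List.pyGetD p0 0 0) < 0 ∨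
       (PySem.List.pyGetD p2 1 0 - PySem.List.pyGetD p1 1 0) *
         (PySem.List.pyGetD p1 1 0 - PySem.List.pyGetD p0 1 0) < 0
    then result + 1 else result

-- zip(tips, tips[1:], tips[2:]) as nested pairs
def backAndForth_alt (tips : List (List Int)) : Int :=
  (tips.zip ((PySem.List.slice tips (some 1) none).zip
             (PySem.List.slice tips (some 2) none))).foldl stepB 0

-- ===== PRECONDITION & SPEC =====
-- Pre_ excludes exactly the inputs where A raises IndexError (a tip with fewer than 2 coordinates)
def Pre_backAndForth (tips : List (List Int)) : Prop := ∀ tip ∈ tips, 2 ≤ tip.length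
instance (tips : List (List Int)) : Decidable (Pre_backAndForth tips) := by
  unfold Pre_backAndForth; infer_instance

def pvWitness_backAndForth : List (List Int) := [[0, 0], [1, 2], [0, 1], [2, 2]]

def Spec_backAndForth (tips : List (List Int)) (out : Int) : Prop := out = backAndForth_alt tips
instance (tips : List (List Int)) (out : Int) : Decidable (Spec_backAndForth tips out) := by
  unfold Spec_backAndForth; infer_instance

-- ===== CLAIM (what is proved, stated in full; the proofs are below) =====
def Claim_equal_backAndForth : Prop := ∀ (tips : List (List Int)), Dom_backAndForth tips →
  Pre_backAndForth tips → Spec_backAndForth tips (backAndForth tips)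

-- ===== LEMMAS AND PROOFS =====

-- the (x, y) pair A and B read from a tip
def pt (t : List Int) : Int × Int := (PySem.List.pyGetD t 0 0, PySem.List.pyGetD t 1 0)

-- common reference count: sign reversals over a sliding 3-point window
def countRev : List (Int × Int) → Int
  | a :: b :: c :: r =>
      (if (c.1 - b.1) * (b.1 - a.1) < 0 ∨ (c.2 - b.2) * (b.2 - a.2) < 0 then 1 else 0) +
        countRev (b :: c :: r)
  | _ => 0

-- velocities A computes after the first point
def velsFrom (p : Int × Int) : List (Int × Int) → List (Int × Int)
  | [] => []
  | q :: r => ((q.1 - p.1) * FPS, (q.2 - p.2) * FPS) :: velsFrom q r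

-- what A's second loop counts once a previous velocity exists
def revCount (v : Int × Int) : List (Int × Int) → Int
  | [] => 0
  | w :: r => (if w.1 * v.1 < 0 ∨ w.2 * v.2 < 0 then 1 else 0) + revCount w r

def lastPt (p : Int × Int) : List (Int × Int) → Int × Int
  | [] => p
  | q :: r => lastPt q r

lemma sign25 (a b : Int) : a * 25 * (b * 25) < 0 ↔ a * b < 0 := by
  constructor <;> intro h <;> nlinarith

lemma loop1 (ps : List (List Int)) : ∀ (p : Int × Int) (vxs vys : List Int),
    ps.foldl stepVel (some p.1, some p.2, vxs, vys) =
      (some (lastPt p (ps.map pt)).1, some (lastPt p (ps.map pt)).2,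
       vxs ++ (velsFrom p (ps.map pt)).map Prod.fst,
       vys ++ (velsFrom p (ps.map pt)).map Prod.snd) := by
  induction ps with
  | nil => intro p vxs vys; simp [lastPt, velsFrom]
  | cons t ts ih =>
      intro p vxs vys
      simp only [List.foldl_cons, stepVel, List.map_cons, velsFrom, lastPt]
      have ih' := ih (pt t)
      simp only [pt] at ih' ⊢
      rw [ih']
      simp [List.append_assoc]

lemma loop2 (vs : List (Int × Int)) : ∀ (v : Int × Int) (r : Int),
    (vs.foldl stepRev (some v.1, some v.2, r)).2.2 = r + revCount v vs := by
  induction vs with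
  | nil => intro v r; simp [revCount]
  | cons w ws ih =>
      intro v r
      simp only [List.foldl_cons, stepRev, revCount]
      rw [ih w]
      split_ifs <;> ring

lemma revCount_velsFrom (r : List (Int × Int)) : ∀ p q : Int × Int,
    revCount ((q.1 - p.1) * FPS, (q.2 - p.2) * FPS) (velsFrom q r) = countRev (p :: q :: r) := by
  induction r with
  | nil => intro p q; simp only [velsFrom, revCount]; rfl
  | cons c r' ih =>
      intro p q
      simp only [velsFrom, revCount, countRev]
      rw [ih q c]
      congr 1
      simp only [FPS, sign25]

lemma revCount_zero (p : Int × Int) (ps : List (Int × Int)) :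
    revCount (0, 0) (velsFrom p ps) = countRev (p :: ps) := by
  cases ps with
  | nil => simp [velsFrom, revCount, countRev]
  | cons q r =>
      simp only [velsFrom, revCount]
      rw [revCount_velsFrom r p q]
      simp

lemma a_eq_countRev (tips : List (List Int)) : backAndForth tips = countRev (tips.map pt) := by
  cases tips with
  | nil => simp [backAndForth, countRev]
  | cons t ts =>
      simp only [backAndForth, List.foldl_cons, stepVel]
      have h1 := loop1 ts (pt t) [0] [0]
      simp only [pt] at h1
      simp only [List.nil_append]
      rw [h1]
      simp only [List.singleton_append]
      simp only [List.zip_cons_cons]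
      rw [List.zip_map']
      simp only [Prod.mk.eta, List.map_id']
      simp only [List.foldl_cons, stepRev]
      rw [loop2 _ ((0 : Int), (0 : Int)) 0]
      simpa [List.map_cons] using revCount_zero (pt t) (ts.map pt)

lemma b_loop (tips : List (List Int)) : ∀ r : Int,
    (tips.zip ((tips.drop 1).zip (tips.drop 2))).foldl stepB r = r + countRev (tips.map pt) := by
  match tips with
  | [] => intro r; simp [countRev]
  | [a] => intro r; simp [countRev]
  | [a, b] => intro r; simp [countRev]
  | a :: b :: c :: rest =>
      intro r
      have ih := b_loop (b :: c :: rest)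
      simp only [List.drop_succ_cons, List.drop_zero, List.zip_cons_cons, List.foldl_cons] at ih ⊢
      rw [ih]
      simp only [List.map_cons, countRev, stepB, pt]
      split_ifs <;> ring
termination_by tips.length

lemma b_eq_countRev (tips : List (List Int)) : backAndForth_alt tips = countRev (tips.map pt) := by
  unfold backAndForth_alt
  have h1 : PySem.List.slice tips (some 1) none = tips.drop 1 := by simp [pysem]
  have h2 : PySem.List.slice tips (some 2) none = tips.drop 2 := by simp [pysem]
  rw [h1, h2]
  simpa using b_loop tips 0

-- ===== VERDICT (by name: the statement is the Claim_ definition above) =====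
theorem backAndForth_spec : Claim_equal_backAndForth := by
  intro tips _ _
  unfold Spec_backAndForth
  rw [a_eq_countRev, b_eq_countRev]
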